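-- pv_equiv track=rewrite | github.com/gavinkflam/aoc | aoc2025/solutions/star21.py | find_in_degrees
-- ===== SOURCE A (Python) =====
-- from typing import Optional
--
-- def find_in_degrees(
--     adj_list: dict[str, list[int]], origin: str, excludes: Optional[set[str]] = None
-- ) -> dict[str, int]:
--     """Perform BFS to find the in-degrees of reachable devices, not in excludes, from origin."""
--     queue = [origin]
--     in_degrees = {}
--     excludes = excludes if excludes is not None else {}
--
--     while queue:
--         new_queue = []
--
--         for device in queue:
--             if device not in adj_list:
--                 continue
--
--             for out_device in adj_list[device]:
--                 if out_device in excludes: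
--                     continue
--
--                 in_degrees[out_device] = in_degrees.get(out_device, 0) + 1
--                 if in_degrees[out_device] > 1:
--                     continue
--
--                 new_queue.append(out_device)
--
--         queue = new_queue
--
--     return in_degrees
-- ===== SOURCE B (Python) =====
-- def find_in_degrees(adj_list, origin, excludes=None):
--     """Two-pass: a reachability BFS with a visited set to collect discovery order,
--     then a separate counting pass over the processed nodes."""
--     if excludes is None:
--         excludes = set()
--     # pass 1: reachability — discovery order of counted (non-excluded, reached) nodes
--     seen = set()
--     order = []
--     queue = [origin]
--     while queue:
--         nxt = []
--         for u in queue: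
--             for v in adj_list.get(u, ()):
--                 if v not in excludes and v not in seen:
--                     seen.add(v)
--                     order.append(v)
--                     nxt.append(v)
--         queue = nxt
--     # pass 2: count edges out of every processed node
--     in_degrees = {}
--     for u in [origin] + order:
--         for v in adj_list.get(u, ()):
--             if v not in excludes:
--                 in_degrees[v] = in_degrees.get(v, 0) + 1
--     return in_degrees
-- ===== Notes on version B (the rewrite author's own statement) =====
-- stated objective: alternative
-- what changed: A fuses reachability and in-degree counting into one BFS whose enqueue decision is driven by the count dict; B decomposes it into a pure reachability BFS with a visited set (collecting discovery order) followed by a separate counting pass over the processed nodes.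
import Mathlib
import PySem

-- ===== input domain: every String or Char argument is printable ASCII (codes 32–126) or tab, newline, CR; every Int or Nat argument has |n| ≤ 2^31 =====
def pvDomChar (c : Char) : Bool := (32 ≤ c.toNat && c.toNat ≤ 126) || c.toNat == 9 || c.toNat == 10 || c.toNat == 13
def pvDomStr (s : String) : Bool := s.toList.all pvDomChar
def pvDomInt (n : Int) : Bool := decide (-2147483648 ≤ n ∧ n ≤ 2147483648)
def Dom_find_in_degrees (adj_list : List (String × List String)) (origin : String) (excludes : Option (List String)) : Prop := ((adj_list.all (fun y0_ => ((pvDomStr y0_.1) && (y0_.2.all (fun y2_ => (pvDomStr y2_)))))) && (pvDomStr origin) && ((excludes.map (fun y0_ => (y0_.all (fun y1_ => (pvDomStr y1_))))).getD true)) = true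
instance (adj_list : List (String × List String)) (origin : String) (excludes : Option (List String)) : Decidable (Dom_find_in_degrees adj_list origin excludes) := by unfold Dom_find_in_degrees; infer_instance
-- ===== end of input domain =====

-- B separates A's fused BFS into a reachability pass plus a counting pass (same return value; no side effects).

-- fuel bound shared by both ports' while-loops (a totality guard only: each
-- level with a non-empty next queue discovers at least one new target)
def pvFuel (adj_list : List (String × List String)) : Nat :=
  (adj_list.map (fun p => p.2.length)).sum + 2

-- ===== PORT A =====
-- one edge step of A's fused loop: increment the count, enqueue on first count
def pvIncrA (exc : List String) (st : PySem.Dict String Int × List String) (v : String) :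
    PySem.Dict String Int × List String :=
  if PySem.Set.contains exc v then st
  else
    let c := st.1.getD v 0 + 1
    let d := st.1.insert v c
    if c > 1 then (d, st.2) else (d, st.2 ++ [v])

-- one device of A's inner for-loop ('if device not in adj_list: continue')
def pvDevA (adj : PySem.Dict String (List String)) (exc : List String)
    (st : PySem.Dict String Int × List String) (device : String) :
    PySem.Dict String Int × List String :=
  match adj.get? device with
  | none => st
  | some outs => outs.foldl (pvIncrA exc) st

-- A's while-loop over BFS levels
def pvLoopA (adj : PySem.Dict String (List String)) (exc : List String) :
    Nat → PySem.Dict String Int → List String → PySem.Dict String Int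
  | 0, d, _ => d
  | fuel+1, d, queue =>
    if queue = [] then d
    else
      let st := queue.foldl (pvDevA adj exc) (d, [])
      pvLoopA adj exc fuel st.1 st.2

def find_in_degrees (adj_list : List (String × List String)) (origin : String)
    (excludes : Option (List String)) : List (String × Int) :=
  (pvLoopA (PySem.Dict.mk adj_list) (excludes.getD []) (pvFuel adj_list)
    PySem.Dict.empty [origin]).items

-- ===== PORT B =====
-- pass-1 edge step: discover a non-excluded, unseen target
def pvMark (exc : List String) (st : PySem.Set String × List String × List String) (v : String) :
    PySem.Set String × List String × List String :=
  if !(PySem.Set.contains exc v) && !(PySem.Set.contains st.1 v) then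
    (PySem.Set.add st.1 v, st.2.1 ++ [v], st.2.2 ++ [v])
  else st

-- pass-1 device step ('adj_list.get(u, ())')
def pvDiscover (adj : PySem.Dict String (List String)) (exc : List String)
    (st : PySem.Set String × List String × List String) (u : String) :
    PySem.Set String × List String × List String :=
  ((adj.get? u).getD []).foldl (pvMark exc) st

-- pass-1 while-loop: reachability BFS, returns discovery order
def pvLoop1 (adj : PySem.Dict String (List String)) (exc : List String) :
    Nat → PySem.Set String → List String → List String → List String
  | 0, _, order, _ => order
  | fuel+1, seen, order, queue =>
    if queue = [] then order
    else
      let st := queue.foldl (pvDiscover adj exc) (seen, order, [])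
      pvLoop1 adj exc fuel st.1 st.2.1 st.2.2

-- pass-2 edge step: plain counting
def pvCnt1 (exc : List String) (d : PySem.Dict String Int) (v : String) : PySem.Dict String Int :=
  if PySem.Set.contains exc v then d else d.insert v (d.getD v 0 + 1)

-- pass-2 device step
def pvCountDev (adj : PySem.Dict String (List String)) (exc : List String)
    (d : PySem.Dict String Int) (u : String) : PySem.Dict String Int :=
  ((adj.get? u).getD []).foldl (pvCnt1 exc) d

def find_in_degrees_alt (adj_list : List (String × List String)) (origin : String)
    (excludes : Option (List String)) : List (String × Int) :=
  let adj := PySem.Dict.mk adj_list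
  let exc := excludes.getD []
  let order := pvLoop1 adj exc (pvFuel adj_list) PySem.Set.empty [] [origin]
  ((origin :: order).foldl (pvCountDev adj exc) PySem.Dict.empty).items

-- ===== PRECONDITION & SPEC =====
def Spec_find_in_degrees (adj_list : List (String × List String)) (origin : String) (excludes : Option (List String)) (out : List (String × Int)) : Prop := out = find_in_degrees_alt adj_list origin excludes
instance (adj_list : List (String × List String)) (origin : String) (excludes : Option (List String)) (out : List (String × Int)) : Decidable (Spec_find_in_degrees adj_list origin excludes out) := by unfold Spec_find_in_degrees; infer_instance

-- ===== CLAIM (what is proved, stated in full; the proofs are below) =====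
def Claim_equal_find_in_degrees : Prop := ∀ (adj_list : List (String × List String)) (origin : String) (excludes : Option (List String)), Dom_find_in_degrees adj_list origin excludes → Spec_find_in_degrees adj_list origin excludes (find_in_degrees adj_list origin excludes)

-- ===== LEMMAS AND PROOFS =====

-- all edge targets of the adjacency list
def pvAllT (adj_list : List (String × List String)) : List String :=
  (adj_list.map Prod.snd).flatten

-- remaining-undiscovered-targets measure, used only to show the fuel suffices
def pvMeasure (T : List String) (seen : PySem.Set String) : Nat :=
  ((PySem.List.dedup T).filter (fun v => !(PySem.Set.contains seen v))).length

theorem pv_inner (exc : List String) (vs : List String) :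
    ∀ (d : PySem.Dict String Int) (nq : List String) (seen : PySem.Set String)
      (order : List String),
      (∀ v, d.contains v = true ↔ v ∈ seen) →
      (∀ v, d.contains v = true → 1 ≤ d.getD v 0) →
      ∃ w,
        vs.foldl (pvIncrA exc) (d, nq) = (vs.foldl (pvCnt1 exc) d, nq ++ w)
        ∧ vs.foldl (pvMark exc) (seen, order, nq) = (seen ++ w, order ++ w, nq ++ w)
        ∧ (∀ x ∈ w, x ∉ seen)
        ∧ w.Nodup
        ∧ (∀ x ∈ w, x ∈ vs)
        ∧ (∀ v, (vs.foldl (pvCnt1 exc) d).contains v = true ↔ v ∈ seen ++ w)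
        ∧ (∀ v, (vs.foldl (pvCnt1 exc) d).contains v = true → 1 ≤ (vs.foldl (pvCnt1 exc) d).getD v 0) := by
  induction vs with
  | nil =>
    intro d nq seen order hk hp
    exact ⟨[], by simp, by simp, by simp, List.nodup_nil, by simp, by simpa using hk, hp⟩
  | cons v vs ih =>
    intro d nq seen order hk hp
    by_cases hexb : PySem.Set.contains exc v = true
    · have hA : pvIncrA exc (d, nq) v = (d, nq) := by
        simp only [pvIncrA, hexb, if_true]
      have hB : pvMark exc (seen, order, nq) v = (seen, order, nq) := by
        simp only [pvMark, hexb]; simp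
      have hC : pvCnt1 exc d v = d := by
        simp only [pvCnt1, hexb, if_true]
      obtain ⟨w, h1, h2, h3, h4, h5, h6, h7⟩ := ih d nq seen order hk hp
      refine ⟨w, ?_, ?_, h3, h4, fun x hx => List.mem_cons_of_mem _ (h5 x hx), ?_, ?_⟩
      · rw [List.foldl_cons, List.foldl_cons, hA, hC]; exact h1
      · rw [List.foldl_cons, hB]; exact h2
      · rw [List.foldl_cons, hC]; exact h6
      · rw [List.foldl_cons, hC]; exact h7
    · replace hexb : PySem.Set.contains exc v = false := by
        cases h : PySem.Set.contains exc v
        · rfl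
        · exact absurd h hexb
      by_cases hs : v ∈ seen
      · have hdc : d.contains v = true := (hk v).mpr hs
        have hge : 1 ≤ d.getD v 0 := hp v hdc
        have hsb : PySem.Set.contains seen v = true := by
          simpa [PySem.Set.contains] using hs
        have hA : pvIncrA exc (d, nq) v = (d.insert v (d.getD v 0 + 1), nq) := by
          simp only [pvIncrA, hexb]
          rw [if_neg (by simp)]
          rw [if_pos (by omega)]
        have hB : pvMark exc (seen, order, nq) v = (seen, order, nq) := by
          simp only [pvMark, hsb]
          simp
        have hC : pvCnt1 exc d v = d.insert v (d.getD v 0 + 1) := by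
          simp only [pvCnt1, hexb]
          rw [if_neg (by simp)]
        set d' := d.insert v (d.getD v 0 + 1) with hd'
        have hk' : ∀ u, d'.contains u = true ↔ u ∈ seen := by
          intro u
          rw [hd', PySem.Dict.contains_insert]
          by_cases hu : u = v
          · subst hu; simp [hs]
          · simp [hu, hk u]
        have hp' : ∀ u, d'.contains u = true → 1 ≤ d'.getD u 0 := by
          intro u hu
          rw [hd', PySem.Dict.getD_insert]
          by_cases huv : u = v
          · rw [if_pos huv]; omega
          · rw [if_neg huv]
            apply hp
            rw [hd', PySem.Dict.contains_insert] at hu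
            simpa [huv] using hu
        obtain ⟨w, h1, h2, h3, h4, h5, h6, h7⟩ := ih d' nq seen order hk' hp'
        refine ⟨w, ?_, ?_, h3, h4, fun x hx => List.mem_cons_of_mem _ (h5 x hx), ?_, ?_⟩
        · rw [List.foldl_cons, List.foldl_cons, hA, hC]; exact h1
        · rw [List.foldl_cons, hB]; exact h2
        · rw [List.foldl_cons, hC]; exact h6
        · rw [List.foldl_cons, hC]; exact h7
      · have hsb : PySem.Set.contains seen v = false := by
          cases h : PySem.Set.contains seen v
          · rfl
          · exact absurd (by simpa [PySem.Set.contains] using h : v ∈ seen) hs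
        have hdc : d.contains v = false := by
          cases hcv : d.contains v
          · rfl
          · exact absurd ((hk v).mp hcv) hs
        have hg0 : d.getD v 0 = 0 := PySem.Dict.getD_of_not_contains d 0 hdc
        have hA : pvIncrA exc (d, nq) v = (d.insert v (d.getD v 0 + 1), nq ++ [v]) := by
          simp only [pvIncrA, hexb]
          rw [if_neg (by simp)]
          rw [if_neg (by omega)]
        have hB : pvMark exc (seen, order, nq) v = (seen ++ [v], order ++ [v], nq ++ [v]) := by
          simp only [pvMark, hexb, hsb]
          rw [if_pos (by simp)]
          simp only [PySem.Set.add, hsb, Bool.false_eq_true, if_false]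
        have hC : pvCnt1 exc d v = d.insert v (d.getD v 0 + 1) := by
          simp only [pvCnt1, hexb]
          rw [if_neg (by simp)]
        set d' := d.insert v (d.getD v 0 + 1) with hd'
        have hk' : ∀ u, d'.contains u = true ↔ u ∈ seen ++ [v] := by
          intro u
          rw [hd', PySem.Dict.contains_insert]
          by_cases hu : u = v
          · subst hu; simp
          · simp [hu, hk u]
        have hp' : ∀ u, d'.contains u = true → 1 ≤ d'.getD u 0 := by
          intro u hu
          rw [hd', PySem.Dict.getD_insert]
          by_cases huv : u = v
          · rw [if_pos huv]; omega
          · rw [if_neg huv]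
            apply hp
            rw [hd', PySem.Dict.contains_insert] at hu
            simpa [huv] using hu
        obtain ⟨w, h1, h2, h3, h4, h5, h6, h7⟩ :=
          ih d' (nq ++ [v]) (seen ++ [v]) (order ++ [v]) hk' hp'
        have hwv : ∀ x ∈ w, x ≠ v := by
          intro x hx hxv
          exact h3 x hx (by simp [hxv])
        refine ⟨v :: w, ?_, ?_, ?_, ?_, ?_, ?_, ?_⟩
        · rw [List.foldl_cons, List.foldl_cons, hA, hC, h1, List.append_assoc,
            List.singleton_append]
        · rw [List.foldl_cons, hB, h2]
          simp [List.append_assoc]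
        · intro x hx
          rcases List.mem_cons.mp hx with rfl | hx
          · exact hs
          · exact fun hxs => h3 x hx (by simp [hxs])
        · exact List.nodup_cons.mpr ⟨fun h => hwv _ h rfl, h4⟩
        · intro x hx
          rcases List.mem_cons.mp hx with rfl | hx
          · exact List.mem_cons_self
          · exact List.mem_cons_of_mem _ (h5 x hx)
        · intro u
          rw [List.foldl_cons, hC, h6 u]
          simp [List.append_assoc]
        · intro u hu
          rw [List.foldl_cons, hC] at hu ⊢
          exact h7 u hu

theorem pv_level (adj : PySem.Dict String (List String)) (exc : List String) (T : List String)
    (hT : ∀ u outs, adj.get? u = some outs → ∀ x ∈ outs, x ∈ T) (q : List String) :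
    ∀ (d : PySem.Dict String Int) (nq : List String) (seen : PySem.Set String)
      (order : List String),
      (∀ v, d.contains v = true ↔ v ∈ seen) →
      (∀ v, d.contains v = true → 1 ≤ d.getD v 0) →
      ∃ w,
        q.foldl (pvDevA adj exc) (d, nq) = (q.foldl (pvCountDev adj exc) d, nq ++ w)
        ∧ q.foldl (pvDiscover adj exc) (seen, order, nq) = (seen ++ w, order ++ w, nq ++ w)
        ∧ (∀ x ∈ w, x ∉ seen)
        ∧ w.Nodup
        ∧ (∀ x ∈ w, x ∈ T)
        ∧ (∀ v, (q.foldl (pvCountDev adj exc) d).contains v = true ↔ v ∈ seen ++ w)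
        ∧ (∀ v, (q.foldl (pvCountDev adj exc) d).contains v = true → 1 ≤ (q.foldl (pvCountDev adj exc) d).getD v 0) := by
  induction q with
  | nil =>
    intro d nq seen order hk hp
    exact ⟨[], by simp, by simp, by simp, List.nodup_nil, by simp, by simpa using hk, hp⟩
  | cons u q ih =>
    intro d nq seen order hk hp
    cases h : adj.get? u with
    | none =>
      have hA : pvDevA adj exc (d, nq) u = (d, nq) := by simp [pvDevA, h]
      have hB : pvDiscover adj exc (seen, order, nq) u = (seen, order, nq) := by
        simp [pvDiscover, h]
      have hC : pvCountDev adj exc d u = d := by simp [pvCountDev, h]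
      obtain ⟨w, h1, h2, h3, h4, h5, h6, h7⟩ := ih d nq seen order hk hp
      refine ⟨w, ?_, ?_, h3, h4, h5, ?_, ?_⟩
      · rw [List.foldl_cons, List.foldl_cons, hA, hC]; exact h1
      · rw [List.foldl_cons, hB]; exact h2
      · rw [List.foldl_cons, hC]; exact h6
      · rw [List.foldl_cons, hC]; exact h7
    | some outs =>
      have hA : pvDevA adj exc (d, nq) u = outs.foldl (pvIncrA exc) (d, nq) := by
        simp [pvDevA, h]
      have hB : pvDiscover adj exc (seen, order, nq) u
          = outs.foldl (pvMark exc) (seen, order, nq) := by simp [pvDiscover, h]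
      have hC : pvCountDev adj exc d u = outs.foldl (pvCnt1 exc) d := by
        simp [pvCountDev, h]
      obtain ⟨w1, g1, g2, g3, g4, g5, g6, g7⟩ := pv_inner exc outs d nq seen order hk hp
      obtain ⟨w2, h1, h2, h3, h4, h5, h6, h7⟩ :=
        ih (outs.foldl (pvCnt1 exc) d) (nq ++ w1) (seen ++ w1) (order ++ w1) g6 g7
      have hw2s : ∀ x ∈ w2, x ∉ seen := fun x hx hxs => h3 x hx (by simp [hxs])
      have hw2w1 : ∀ x ∈ w2, x ∉ w1 := fun x hx hxs => h3 x hx (by simp [hxs])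
      refine ⟨w1 ++ w2, ?_, ?_, ?_, ?_, ?_, ?_, ?_⟩
      · rw [List.foldl_cons, List.foldl_cons, hA, hC, g1, h1, List.append_assoc]
      · rw [List.foldl_cons, hB, g2, h2]
        simp [List.append_assoc]
      · intro x hx
        rcases List.mem_append.mp hx with hx | hx
        · exact g3 x hx
        · exact hw2s x hx
      · exact List.Nodup.append g4 h4 (fun x hx1 hx2 => hw2w1 x hx2 hx1)
      · intro x hx
        rcases List.mem_append.mp hx with hx | hx
        · exact hT u outs h x (g5 x hx)
        · exact h5 x hx
      · intro v
        rw [List.foldl_cons, hC, h6 v]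
        simp [List.append_assoc]
      · intro v hv
        rw [List.foldl_cons, hC] at hv ⊢
        exact h7 v hv

-- a strict countP comparison (weaker predicate plus one witness)
theorem pv_countP_lt (l : List String) (p q : String → Bool)
    (h : ∀ a ∈ l, p a = true → q a = true)
    (x : String) (hx : x ∈ l) (hqx : q x = true) (hpx : p x = false) :
    l.countP p < l.countP q := by
  induction l with
  | nil => cases hx
  | cons a l ih =>
    rw [List.countP_cons, List.countP_cons]
    rcases List.mem_cons.mp hx with rfl | hx'
    · rw [hpx, hqx]
      simp only [if_true, Bool.false_eq_true, if_false, add_zero]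
      have := List.countP_mono_left (l := l) (p := p) (q := q)
        (fun a ha hpa => h a (List.mem_cons_of_mem _ ha) hpa)
      omega
    · have hle : (if p a = true then 1 else 0) ≤ (if q a = true then 1 else 0) := by
        by_cases hpa : p a = true
        · rw [if_pos hpa, if_pos (h a List.mem_cons_self hpa)]
        · rw [if_neg hpa]; split <;> omega
      have := ih (fun b hb => h b (List.mem_cons_of_mem _ hb)) hx'
      omega

theorem pv_measure_lt (T : List String) (seen : PySem.Set String) (w : List String)
    (hw : ∀ x ∈ w, x ∉ seen) (hsub : ∀ x ∈ w, x ∈ T)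
    (hne : w ≠ []) : pvMeasure T (seen ++ w) < pvMeasure T seen := by
  obtain ⟨x, w', rfl⟩ : ∃ x w', w = x :: w' := by
    cases w with
    | nil => exact absurd rfl hne
    | cons x w' => exact ⟨x, w', rfl⟩
  unfold pvMeasure
  rw [← List.countP_eq_length_filter, ← List.countP_eq_length_filter]
  refine pv_countP_lt _ _ _ ?_ x ?_ ?_ ?_
  · intro a _ hpa
    simp only [PySem.Set.contains, Bool.not_eq_true', List.contains_append,
      Bool.or_eq_false_iff] at hpa
    simp only [PySem.Set.contains, Bool.not_eq_true']
    exact hpa.1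
  · exact (PySem.List.mem_dedup T x).mpr (hsub x List.mem_cons_self)
  · simp only [PySem.Set.contains, Bool.not_eq_true']
    simpa using hw x List.mem_cons_self
  · simp [PySem.Set.contains]

-- main lock-step simulation of the two while-loops
theorem pv_main (adj : PySem.Dict String (List String)) (exc : List String) (T : List String)
    (hT : ∀ u outs, adj.get? u = some outs → ∀ x ∈ outs, x ∈ T) (origin : String) :
    ∀ (fuel : Nat) (q P : List String) (d : PySem.Dict String Int)
      (seen : PySem.Set String) (order : List String),
      d = P.foldl (pvCountDev adj exc) PySem.Dict.empty →
      P ++ q = origin :: order →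
      (∀ v, d.contains v = true ↔ v ∈ seen) →
      (∀ v, d.contains v = true → 1 ≤ d.getD v 0) →
      (q ≠ [] → pvMeasure T seen + 2 ≤ fuel) →
      pvLoopA adj exc fuel d q
        = (origin :: pvLoop1 adj exc fuel seen order q).foldl (pvCountDev adj exc) PySem.Dict.empty := by
  intro fuel
  induction fuel with
  | zero =>
    intro q P d seen order hd hPq hk hp hfuel
    by_cases hq : q = []
    · subst hq
      simp only [List.append_nil] at hPq
      subst hPq
      simpa [pvLoopA, pvLoop1] using hd
    · exact absurd (hfuel hq) (by omega)
  | succ fuel ih =>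
    intro q P d seen order hd hPq hk hp hfuel
    by_cases hq : q = []
    · subst hq
      simp only [List.append_nil] at hPq
      subst hPq
      simp only [pvLoopA, pvLoop1]
      exact hd
    · obtain ⟨w, e1, e2, e3, e4, e5, e6, e7⟩ := pv_level adj exc T hT q d [] seen order hk hp
      rw [show pvLoopA adj exc (fuel + 1) d q
            = pvLoopA adj exc fuel (q.foldl (pvDevA adj exc) (d, [])).1
                (q.foldl (pvDevA adj exc) (d, [])).2 by
          simp only [pvLoopA, if_neg hq],
        show pvLoop1 adj exc (fuel + 1) seen order q
            = pvLoop1 adj exc fuel (q.foldl (pvDiscover adj exc) (seen, order, [])).1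
                (q.foldl (pvDiscover adj exc) (seen, order, [])).2.1
                (q.foldl (pvDiscover adj exc) (seen, order, [])).2.2 by
          simp only [pvLoop1, if_neg hq],
        e1, e2]
      simp only [List.nil_append]
      apply ih w (P ++ q) _ (seen ++ w) (order ++ w)
      · rw [hd, List.foldl_append]
      · rw [hPq]; simp
      · exact e6
      · exact e7
      · intro hw
        have hlt := pv_measure_lt T seen w e3 e5 hw
        have := hfuel hq
        omega

-- the targets of any adjacency lookup are collected in pvAllT
theorem pv_hT (adj_list : List (String × List String)) :
    ∀ u outs, (PySem.Dict.mk adj_list).get? u = some outs → ∀ x ∈ outs, x ∈ pvAllT adj_list := by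
  intro u outs h x hx
  have hm : (u, outs) ∈ adj_list := by
    have := PySem.Dict.mem_items_of_get?_eq_some (d := PySem.Dict.mk adj_list)
      (k := u) (v := outs) h
    simpa [PySem.Dict.items] using this
  exact List.mem_flatten.mpr ⟨outs, List.mem_map.mpr ⟨(u, outs), hm, rfl⟩, hx⟩

-- the fuel dominates the initial measure
theorem pv_fuel_ge (adj_list : List (String × List String)) :
    pvMeasure (pvAllT adj_list) [] + 2 ≤ pvFuel adj_list := by
  unfold pvMeasure pvFuel
  have h1 : ((PySem.List.dedup (pvAllT adj_list)).filter
      (fun v => !(PySem.Set.contains ([] : List String) v))).length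
      ≤ (PySem.List.dedup (pvAllT adj_list)).length := List.length_filter_le _ _
  have h2 : (PySem.List.dedup (pvAllT adj_list)).length ≤ (pvAllT adj_list).length :=
    List.Subperm.length_le (List.subperm_of_subset (PySem.List.nodup_dedup _)
      (fun x hx => (PySem.List.mem_dedup _ x).mp hx))
  have h3 : (pvAllT adj_list).length = (adj_list.map (fun p => p.2.length)).sum := by
    unfold pvAllT
    rw [List.length_flatten, List.map_map]
    rfl
  omega

-- ===== VERDICT (by name: the statement is the Claim_ definition above) =====
theorem find_in_degrees_spec : Claim_equal_find_in_degrees := by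
  intro adj_list origin excludes _
  unfold Spec_find_in_degrees
  simp only [find_in_degrees, find_in_degrees_alt]
  have h := pv_main (PySem.Dict.mk adj_list) (excludes.getD []) (pvAllT adj_list)
    (pv_hT adj_list) origin (pvFuel adj_list) [origin] [] PySem.Dict.empty [] []
    (by simp) rfl (by simp [PySem.Dict.contains_empty])
    (by intro v hv; rw [PySem.Dict.contains_empty] at hv; cases hv)
    (fun _ => pv_fuel_ge adj_list)
  rw [h]
  rfl
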